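-- pv_equiv track=rewrite | github.com/anujdivesh/middleware_partner_api | cyclone_track/utils.py | _unique_headers
-- ===== SOURCE A (Python) =====
-- from typing import Any
--
-- def _clean_cell(value: Any) -> str:
--     if value is None:
--         return ""
--     return str(value).strip()
--
-- def _unique_headers(headers: list[str]) -> list[str]:
--     """Ensure headers are unique JSON keys."""
--     seen: dict[str, int] = {}
--     out: list[str] = []
--     for h in headers:
--         base = _clean_cell(h) or "col"
--         count = seen.get(base, 0)
--         if count == 0:
--             out.append(base)
--         else:
--             out.append(f"{base}_{count}")
--         seen[base] = count + 1
--     return out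
-- ===== SOURCE B (Python) =====
-- from typing import Any
--
-- def _clean_cell(value: Any) -> str:
--     if value is None:
--         return ""
--     return str(value).strip()
--
-- def _unique_headers(headers: list[str]) -> list[str]:
--     """Ensure headers are unique JSON keys."""
--     bases = [_clean_cell(h) or "col" for h in headers]
--     remaining: dict[str, int] = {}
--     for b in bases:
--         remaining[b] = remaining.get(b, 0) + 1
--     out: list[str] = []
--     for b in reversed(bases):
--         k = remaining[b] - 1
--         remaining[b] = k
--         out.append(b if k == 0 else f"{b}_{k}")
--     out.reverse()
--     return out
-- ===== Notes on version B (the rewrite author's own statement) =====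
-- stated objective: alternative
-- what changed: Instead of A's single forward pass that grows a `seen` counter dict as it emits names, B counts the total occurrences of every cleaned base once, then builds the output back-to-front, decrementing the totals so that each position's suffix is its remaining prefix count, and reverses at the end.
import Mathlib
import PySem

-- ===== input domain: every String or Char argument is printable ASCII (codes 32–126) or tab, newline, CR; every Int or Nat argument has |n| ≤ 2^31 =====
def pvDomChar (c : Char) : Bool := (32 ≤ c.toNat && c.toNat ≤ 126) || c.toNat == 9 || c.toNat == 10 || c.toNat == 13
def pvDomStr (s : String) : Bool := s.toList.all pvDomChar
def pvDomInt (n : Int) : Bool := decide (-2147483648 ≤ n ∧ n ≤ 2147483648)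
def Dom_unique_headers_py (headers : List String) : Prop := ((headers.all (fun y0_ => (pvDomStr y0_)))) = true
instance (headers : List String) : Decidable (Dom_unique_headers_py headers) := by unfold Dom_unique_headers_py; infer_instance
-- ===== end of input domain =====

-- ===== PORT A =====
-- B builds the result back-to-front from precomputed totals instead of A's forward pass over a running `seen` dict (alternative, not faster).
-- _clean_cell(h) for a str argument is str(h).strip(); `or "col"` replaces the empty result.
def pvBase (h : String) : String :=
  let t := PySem.Str.strip h
  if t = "" then "col" else t

def pvStepA (st : PySem.Dict String Int × List String) (h : String) :
    PySem.Dict String Int × List String :=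
  let base := pvBase h
  let count := st.1.getD base 0
  let out := if count = 0 then st.2 ++ [base] else st.2 ++ [base ++ "_" ++ PySem.Int.toStr count]
  (st.1.insert base (count + 1), out)

def unique_headers_py (headers : List String) : List String :=
  (headers.foldl pvStepA (PySem.Dict.empty, [])).2

-- ===== PORT B =====
-- `remaining[b]` in Source B cannot raise: every base was counted in the first pass, so getD is exact here.
def pvStepB (st : PySem.Dict String Int × List String) (b : String) :
    PySem.Dict String Int × List String :=
  let k := st.1.getD b 0 - 1
  (st.1.insert b k, st.2 ++ [if k = 0 then b else b ++ "_" ++ PySem.Int.toStr k])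

def unique_headers_py_alt (headers : List String) : List String :=
  let bases := headers.map pvBase
  let remaining := bases.foldl (fun d b => d.insert b (d.getD b 0 + 1)) PySem.Dict.empty
  ((bases.reverse.foldl pvStepB (remaining, [])).2).reverse

-- ===== PRECONDITION & SPEC =====
def Spec_unique_headers_py (headers : List String) (out : List String) : Prop := out = unique_headers_py_alt headers
instance (headers : List String) (out : List String) : Decidable (Spec_unique_headers_py headers out) := by unfold Spec_unique_headers_py; infer_instance

-- ===== CLAIM (what is proved, stated in full; the proofs are below) =====
def Claim_equal_unique_headers_py : Prop := ∀ (headers : List String), Dom_unique_headers_py headers → Spec_unique_headers_py headers (unique_headers_py headers)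

-- ===== LEMMAS AND PROOFS =====

-- Common characterisation both ports are reduced to: position i gets its base,
-- suffixed by the number of equal bases strictly before it.
def pvMid (bs : List String) : List String :=
  (PySem.List.enumerate bs 0).map (fun ib =>
    let c := PySem.List.count (PySem.List.slice bs none (some ib.1)) ib.2
    if c = 0 then ib.2 else ib.2 ++ "_" ++ PySem.Int.toStr (c : Int))

theorem pvMidSnoc (bs : List String) (b : String) :
    pvMid (bs ++ [b])
      = pvMid bs ++
        [if bs.count b = 0 then b else b ++ "_" ++ PySem.Int.toStr (bs.count b : Int)] := by
  simp only [pvMid]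
  rw [PySem.List.enumerate_append, List.map_append]
  congr 1
  · apply List.map_congr_left
    intro p hp
    obtain ⟨k, hk, rfl⟩ := (PySem.List.mem_enumerate_iff _ _ _).1 hp
    have hk' : (0 : Int) + (k : Int) = (k : Int) := by omega
    simp only [hk']
    rw [PySem.List.slice_to _ (by omega : (0:Int) ≤ (k:Int)),
        PySem.List.slice_to _ (by omega : (0:Int) ≤ (k:Int)),
        Int.toNat_natCast, List.take_append_of_le_length hk.le]
  · simp only [PySem.List.enumerate, List.map_cons, List.map_nil]
    have hz : (0 : Int) + ((bs.length : Int)) = (bs.length : Int) := by omega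
    rw [hz, PySem.List.slice_to _ (by omega : (0:Int) ≤ ((bs.length : Int))),
        Int.toNat_natCast, List.take_left]
    simp [PySem.List.count]

-- The dict component of A's fold is the plain occurrence-counting fold over the cleaned bases.
theorem pvDictA (hs : List String) (st : PySem.Dict String Int × List String) :
    (hs.foldl pvStepA st).1
      = (hs.map pvBase).foldl (fun d b => d.insert b (d.getD b 0 + 1)) st.1 := by
  induction hs generalizing st with
  | nil => rfl
  | cons h t ih => simpa [pvStepA] using ih _

theorem pvMainA (hs : List String) :
    (hs.foldl pvStepA (PySem.Dict.empty, [])).2 = pvMid (hs.map pvBase) := by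
  induction hs using List.reverseRecOn with
  | nil => rfl
  | append_singleton t h ih =>
      rw [List.foldl_append, List.foldl_cons, List.foldl_nil, List.map_append,
          List.map_cons, List.map_nil, pvMidSnoc]
      have hc : ((t.foldl pvStepA (PySem.Dict.empty, [])).1).getD (pvBase h) 0
          = ((t.map pvBase).count (pvBase h) : Int) := by
        rw [pvDictA t (PySem.Dict.empty, []), PySem.Dict.getD_foldl_insert_add_one]
        simp [pysem]
      simp only [pvStepA, hc, ih]
      by_cases h0 : (((t.map pvBase).count (pvBase h) : Int)) = 0 <;>
        simp_all [Int.natCast_eq_zero]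

-- B's fold threads the output accumulator passively.
theorem pvOutAccum (l : List String) (d : PySem.Dict String Int) (o : List String) :
    l.foldl pvStepB (d, o)
      = ((l.foldl pvStepB (d, [])).1, o ++ (l.foldl pvStepB (d, [])).2) := by
  induction l generalizing d o with
  | nil => simp
  | cons b t ih =>
      simp only [List.foldl_cons, pvStepB, List.nil_append]
      rw [ih, ih (d.insert b (d.getD b 0 - 1)) ([if d.getD b 0 - 1 = 0 then b
            else b ++ "_" ++ PySem.Int.toStr (d.getD b 0 - 1)])]
      simp

-- B's output depends on the dict only through its getD values.
theorem pvCongB (l : List String) (d d' : PySem.Dict String Int)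
    (hdd : ∀ x, d.getD x 0 = d'.getD x 0) :
    (l.foldl pvStepB (d, [])).2 = (l.foldl pvStepB (d', [])).2 := by
  induction l generalizing d d' with
  | nil => rfl
  | cons b t ih =>
      simp only [List.foldl_cons, pvStepB, hdd b]
      rw [pvOutAccum t _ _, pvOutAccum t (d'.insert b (d'.getD b 0 - 1)) _]
      simp only [List.nil_append]
      congr 1
      apply ih
      intro x
      rw [PySem.Dict.getD_insert, PySem.Dict.getD_insert]
      split
      · rfl
      · exact hdd x

theorem pvMainB (bs : List String) :
    ((bs.reverse.foldl pvStepB (PySem.Dict.counter bs, [])).2).reverse = pvMid bs := by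
  induction bs using List.reverseRecOn with
  | nil => rfl
  | append_singleton t b ih =>
      rw [List.reverse_append, List.reverse_singleton, List.singleton_append,
          List.foldl_cons, pvMidSnoc]
      have hk : (PySem.Dict.counter (t ++ [b])).getD b 0 - 1 = (t.count b : Int) := by
        rw [PySem.Dict.getD_counter]
        simp [List.count_append]
      simp only [pvStepB, hk]
      rw [pvOutAccum, pvCongB t.reverse _ (PySem.Dict.counter t) ?_]
      · rw [List.nil_append, List.reverse_append, List.reverse_singleton, ih]
        by_cases h0 : ((t.count b : Int)) = 0 <;>
          simp_all [Int.natCast_eq_zero]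
      · intro x
        rw [PySem.Dict.getD_insert, PySem.Dict.getD_counter, PySem.Dict.getD_counter]
        split
        · subst x; rfl
        · rename_i hx
          have hbx : b ≠ x := fun h => hx h.symm
          simp [List.count_append, hbx]

-- ===== VERDICT (by name: the statement is the Claim_ definition above) =====
theorem unique_headers_py_spec : Claim_equal_unique_headers_py := by
  intro headers _
  unfold Spec_unique_headers_py unique_headers_py unique_headers_py_alt
  show (List.foldl pvStepA (PySem.Dict.empty, []) headers).2 =
    ((((headers.map pvBase).reverse).foldl pvStepB
        ((headers.map pvBase).foldl (fun d b => d.insert b (d.getD b 0 + 1)) PySem.Dict.empty, [])).2).reverse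
  rw [PySem.Dict.foldl_insert_getD_add_one_eq_counter, pvMainB, pvMainA]
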